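-- pv_equiv track=rewrite | github.com/nakengelhardt/fpgagraphlib | src/graph_input.py | max_node_per_pe
-- ===== SOURCE A (Python) =====
-- def max_node_per_pe(adj_dict, num_pe, num_nodes_per_pe):
--     max_node = [0 for _ in range(num_pe)]
--     for node in adj_dict:
--         pe = node//num_nodes_per_pe
--         localnode = node % num_nodes_per_pe
--         if max_node[pe] < localnode:
--             max_node[pe] = localnode
--     return max_node
-- ===== SOURCE B (Python) =====
-- def max_node_per_pe(adj_dict, num_pe, num_nodes_per_pe):
--     buckets = [[0] for _ in range(num_pe)]
--     for node in adj_dict: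
--         buckets[node // num_nodes_per_pe].append(node % num_nodes_per_pe)
--     return [max(b) for b in buckets]
-- ===== Notes on version B (the rewrite author's own statement) =====
-- stated objective: alternative
-- what changed: Two-phase bucket-collect-then-reduce: B gathers every node's local index into a per-PE bucket list and takes each bucket's max at the end, instead of A's single pass of compare-and-update writes into a preallocated int array.
import Mathlib
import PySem

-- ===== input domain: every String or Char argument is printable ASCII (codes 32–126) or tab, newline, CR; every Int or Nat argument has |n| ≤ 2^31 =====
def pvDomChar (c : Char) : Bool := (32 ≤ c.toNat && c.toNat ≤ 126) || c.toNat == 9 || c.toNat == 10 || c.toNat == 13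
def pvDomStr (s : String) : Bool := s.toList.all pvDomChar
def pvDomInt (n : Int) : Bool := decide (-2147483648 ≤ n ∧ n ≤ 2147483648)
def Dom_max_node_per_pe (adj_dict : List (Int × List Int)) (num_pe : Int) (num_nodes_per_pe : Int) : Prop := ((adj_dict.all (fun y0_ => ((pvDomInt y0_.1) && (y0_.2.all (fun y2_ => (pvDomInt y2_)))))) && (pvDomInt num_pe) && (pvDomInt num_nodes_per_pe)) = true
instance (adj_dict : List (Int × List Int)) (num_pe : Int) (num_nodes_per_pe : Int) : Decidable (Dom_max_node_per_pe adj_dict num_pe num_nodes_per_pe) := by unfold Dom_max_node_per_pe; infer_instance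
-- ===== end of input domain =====

-- ===== PORT A =====
-- B changes the decomposition (bucket-collect per PE, then reduce each bucket by max) at the same cost;
-- A's in-place writes go into a fresh local list, so no caller-visible mutation is at stake.
def max_node_per_pe (adj_dict : List (Int × List Int)) (num_pe : Int) (num_nodes_per_pe : Int) : List Int :=
  adj_dict.foldl (fun max_node node =>
      let pe := PySem.Int.floordiv node.1 num_nodes_per_pe
      let localnode := PySem.Int.mod node.1 num_nodes_per_pe
      if PySem.List.pyGetD max_node pe 0 < localnode then
        PySem.List.pySetD max_node pe localnode
      else max_node)
    ((PySem.List.pyRange 0 num_pe 1).map (fun _ => 0))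

-- ===== PORT B =====
def max_node_per_pe_alt (adj_dict : List (Int × List Int)) (num_pe : Int) (num_nodes_per_pe : Int) : List Int :=
  ((adj_dict.foldl (fun buckets node =>
      -- buckets[node // num_nodes_per_pe].append(node % num_nodes_per_pe)
      PySem.List.pySetD buckets (PySem.Int.floordiv node.1 num_nodes_per_pe)
        (PySem.List.pyGetD buckets (PySem.Int.floordiv node.1 num_nodes_per_pe) []
          ++ [PySem.Int.mod node.1 num_nodes_per_pe]))
    ((PySem.List.pyRange 0 num_pe 1).map (fun _ => [0]))).map
    -- max(b); every bucket is nonempty (seeded with [0]), so the default is never used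
    (fun b => PySem.List.maxD b (fun x => x) 0))

-- ===== PRECONDITION & SPEC =====
-- Pre_ excludes exactly the inputs where A raises: num_nodes_per_pe = 0 with a nonempty adj_dict
-- (ZeroDivisionError) and any node key whose PE index node//num_nodes_per_pe falls outside the
-- wrap range [-num_pe, num_pe) (IndexError).
def Pre_max_node_per_pe (adj_dict : List (Int × List Int)) (num_pe : Int) (num_nodes_per_pe : Int) : Prop :=
  (adj_dict = [] ∨ num_nodes_per_pe ≠ 0) ∧ ∀ node ∈ adj_dict,
    -num_pe ≤ PySem.Int.floordiv node.1 num_nodes_per_pe ∧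
    PySem.Int.floordiv node.1 num_nodes_per_pe < num_pe
instance (adj_dict : List (Int × List Int)) (num_pe : Int) (num_nodes_per_pe : Int) : Decidable (Pre_max_node_per_pe adj_dict num_pe num_nodes_per_pe) := by unfold Pre_max_node_per_pe; infer_instance
def pvWitness_max_node_per_pe : (List (Int × List Int)) × Int × Int := ([(3, [1]), (5, [])], 2, 3)
def Spec_max_node_per_pe (adj_dict : List (Int × List Int)) (num_pe : Int) (num_nodes_per_pe : Int) (out : List Int) : Prop := out = max_node_per_pe_alt adj_dict num_pe num_nodes_per_pe
instance (adj_dict : List (Int × List Int)) (num_pe : Int) (num_nodes_per_pe : Int) (out : List Int) : Decidable (Spec_max_node_per_pe adj_dict num_pe num_nodes_per_pe out) := by unfold Spec_max_node_per_pe; infer_instance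

-- ===== CLAIM (what is proved, stated in full; the proofs are below) =====
def Claim_equal_max_node_per_pe : Prop := ∀ (adj_dict : List (Int × List Int)) (num_pe : Int) (num_nodes_per_pe : Int), Dom_max_node_per_pe adj_dict num_pe num_nodes_per_pe → Pre_max_node_per_pe adj_dict num_pe num_nodes_per_pe → Spec_max_node_per_pe adj_dict num_pe num_nodes_per_pe (max_node_per_pe adj_dict num_pe num_nodes_per_pe)

-- ===== LEMMAS AND PROOFS =====

-- Python's normalised list index on the wrap range [-n, n)
def pvIdx (n : Nat) (i : Int) : Nat := if 0 ≤ i then i.toNat else n - (-i).toNat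

lemma pvIdx_lt (n : Nat) (i : Int) (h1 : -(n : Int) ≤ i) (h2 : i < (n : Int)) : pvIdx n i < n := by
  unfold pvIdx; split <;> omega

lemma pyIdx?_inrange (n : Nat) (i : Int) (h1 : -(n : Int) ≤ i) (h2 : i < (n : Int)) :
    PySem.List.pyIdx? n i = some (pvIdx n i) := by
  unfold PySem.List.pyIdx? pvIdx
  split <;> rfl

lemma pyGetD_inrange {α : Type} (xs : List α) (i : Int) (d : α)
    (h1 : -(xs.length : Int) ≤ i) (h2 : i < (xs.length : Int)) :
    PySem.List.pyGetD xs i d = xs[pvIdx xs.length i]'(pvIdx_lt _ _ h1 h2) := by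
  unfold PySem.List.pyGetD PySem.List.pyGet?
  rw [pyIdx?_inrange _ _ h1 h2]
  simp [List.getElem?_eq_getElem (pvIdx_lt _ _ h1 h2)]

lemma pySetD_inrange {α : Type} (xs : List α) (i : Int) (v : α)
    (h1 : -(xs.length : Int) ≤ i) (h2 : i < (xs.length : Int)) :
    PySem.List.pySetD xs i v = xs.set (pvIdx xs.length i) v := by
  unfold PySem.List.pySetD PySem.List.pySet?
  rw [pyIdx?_inrange _ _ h1 h2]
  rfl

-- A's loop body and B's loop body, named so the coupling lemma can speak about them.
def pvStepA (num_nodes_per_pe : Int) (ms : List Int) (node : Int × List Int) : List Int :=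
  if PySem.List.pyGetD ms (PySem.Int.floordiv node.1 num_nodes_per_pe) 0 < PySem.Int.mod node.1 num_nodes_per_pe then
    PySem.List.pySetD ms (PySem.Int.floordiv node.1 num_nodes_per_pe) (PySem.Int.mod node.1 num_nodes_per_pe)
  else ms

def pvStepB (num_nodes_per_pe : Int) (bs : List (List Int)) (node : Int × List Int) : List (List Int) :=
  PySem.List.pySetD bs (PySem.Int.floordiv node.1 num_nodes_per_pe)
    (PySem.List.pyGetD bs (PySem.Int.floordiv node.1 num_nodes_per_pe) []
      ++ [PySem.Int.mod node.1 num_nodes_per_pe])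

lemma max_node_per_pe_eq_foldl (adj_dict : List (Int × List Int)) (num_pe num_nodes_per_pe : Int) :
    max_node_per_pe adj_dict num_pe num_nodes_per_pe
      = adj_dict.foldl (pvStepA num_nodes_per_pe) ((PySem.List.pyRange 0 num_pe 1).map (fun _ => 0)) := rfl

lemma max_node_per_pe_alt_eq_foldl (adj_dict : List (Int × List Int)) (num_pe num_nodes_per_pe : Int) :
    max_node_per_pe_alt adj_dict num_pe num_nodes_per_pe
      = (adj_dict.foldl (pvStepB num_nodes_per_pe) ((PySem.List.pyRange 0 num_pe 1).map (fun _ => [0]))).map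
          (fun b => PySem.List.maxD b (fun x => x) 0) := rfl

-- Coupling invariant: bucket j is 0 :: tl and A's running maximum at j is the running max of tl.
lemma pvCouple (num_nodes_per_pe : Int) (l : List (Int × List Int)) (ms : List Int) (bs : List (List Int))
    (hlen : ms.length = bs.length)
    (hpre : ∀ p ∈ l, -(ms.length : Int) ≤ PySem.Int.floordiv p.1 num_nodes_per_pe ∧
            PySem.Int.floordiv p.1 num_nodes_per_pe < (ms.length : Int))
    (hinv : ∀ j, j < ms.length → ∃ tl, bs.getD j [] = 0 :: tl ∧ ms.getD j 0 = tl.foldl max 0) :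
    (l.foldl (pvStepA num_nodes_per_pe) ms).length = ms.length ∧
    (l.foldl (pvStepB num_nodes_per_pe) bs).length = bs.length ∧
    ∀ j, j < ms.length → ∃ tl, (l.foldl (pvStepB num_nodes_per_pe) bs).getD j [] = 0 :: tl ∧
      (l.foldl (pvStepA num_nodes_per_pe) ms).getD j 0 = tl.foldl max 0 := by
  induction l generalizing ms bs with
  | nil => exact ⟨rfl, rfl, hinv⟩
  | cons p t ih =>
      obtain ⟨hlo, hhi⟩ := hpre p (List.mem_cons_self)
      set pe := PySem.Int.floordiv p.1 num_nodes_per_pe with hpedef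
      set m := PySem.Int.mod p.1 num_nodes_per_pe with hmdef
      set s := pvIdx ms.length pe with hsdef
      have hs : s < ms.length := pvIdx_lt _ _ hlo hhi
      have hsb : s < bs.length := hlen ▸ hs
      -- both loop bodies touch exactly slot s
      have hGA : PySem.List.pyGetD ms pe 0 = ms.getD s 0 := by
        rw [pyGetD_inrange ms pe 0 hlo hhi]
        exact (List.getD_eq_getElem _ _ hs).symm
      have hSA : ∀ v : Int, PySem.List.pySetD ms pe v = ms.set s v :=
        fun v => pySetD_inrange ms pe v hlo hhi
      have hIdxb : pvIdx bs.length pe = s := by rw [hsdef, hlen]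
      have hGB : PySem.List.pyGetD bs pe [] = bs.getD s [] := by
        rw [pyGetD_inrange bs pe [] (by omega) (by omega),
            ← List.getD_eq_getElem _ _ (pvIdx_lt bs.length pe (by omega) (by omega)), hIdxb]
      have hSB : ∀ v : List Int, PySem.List.pySetD bs pe v = bs.set s v := by
        intro v
        rw [pySetD_inrange bs pe v (by omega) (by omega), hIdxb]
      have hstepA : pvStepA num_nodes_per_pe ms p = ms.set s (max (ms.getD s 0) m) := by
        unfold pvStepA
        rw [← hpedef, ← hmdef, hGA, hSA]
        split
        next h => rw [max_eq_right h.le]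
        next h => rw [max_eq_left (not_lt.mp h), List.getD_eq_getElem _ _ hs, List.set_getElem_self]
      have hstepB : pvStepB num_nodes_per_pe bs p = bs.set s (bs.getD s [] ++ [m]) := by
        unfold pvStepB
        rw [← hpedef, ← hmdef, hGB, hSB]
      obtain ⟨tls, htls, hmax⟩ := hinv s hs
      set ms' := ms.set s (max (ms.getD s 0) m) with hms'
      set bs' := bs.set s (bs.getD s [] ++ [m]) with hbs'
      have hlen' : ms'.length = bs'.length := by simp [hms', hbs', hlen]
      have hmslen : ms'.length = ms.length := by simp [hms']
      have hinv' : ∀ j, j < ms'.length → ∃ tl, bs'.getD j [] = 0 :: tl ∧ ms'.getD j 0 = tl.foldl max 0 := by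
        intro j hj
        rw [hmslen] at hj
        have hjb : j < bs.length := hlen ▸ hj
        by_cases hjs : j = s
        · subst hjs
          refine ⟨tls ++ [m], ?_, ?_⟩
          · rw [hbs', List.getD_eq_getElem _ _ (by simpa using hjb),
                List.getElem_set_self (by simpa using hjb), htls]
            rfl
          · rw [hms', List.getD_eq_getElem _ _ (by simpa using hj),
                List.getElem_set_self (by simpa using hj), hmax, List.foldl_concat]
        · obtain ⟨tl, h1, h2⟩ := hinv j hj
          refine ⟨tl, ?_, ?_⟩
          · rw [hbs', List.getD_eq_getElem _ _ (by simpa using hjb),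
                List.getElem_set_ne (by omega) _, ← List.getD_eq_getElem _ _ hjb]
            exact h1
          · rw [hms', List.getD_eq_getElem _ _ (by simpa using hj),
                List.getElem_set_ne (by omega) _, ← List.getD_eq_getElem _ _ hj]
            exact h2
      have hpre' : ∀ q ∈ t, -(ms'.length : Int) ≤ PySem.Int.floordiv q.1 num_nodes_per_pe ∧
          PySem.Int.floordiv q.1 num_nodes_per_pe < (ms'.length : Int) := by
        intro q hq
        rw [hmslen]
        exact hpre q (List.mem_cons_of_mem _ hq)
      obtain ⟨la, lb, hrest⟩ := ih ms' bs' hlen' hpre' hinv'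
      rw [hmslen] at la hrest
      refine ⟨?_, ?_, ?_⟩
      · simpa [List.foldl_cons, hstepA, ← hms'] using la
      · have : bs'.length = bs.length := by simp [hbs']
        simpa [List.foldl_cons, hstepB, ← hbs', this] using lb
      · simpa [List.foldl_cons, hstepA, hstepB, ← hms', ← hbs'] using hrest

-- ===== VERDICT (by name: the statement is the Claim_ definition above) =====
theorem max_node_per_pe_spec : Claim_equal_max_node_per_pe := by
  intro adj_dict num_pe num_nodes_per_pe _hdom hpre
  obtain ⟨_hnz, hrange⟩ := hpre
  unfold Spec_max_node_per_pe
  rw [max_node_per_pe_eq_foldl, max_node_per_pe_alt_eq_foldl]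
  set R := PySem.List.pyRange 0 num_pe 1 with hR
  set ms := R.map (fun _ => (0 : Int)) with hms
  set bs := R.map (fun _ => ([0] : List Int)) with hbs
  have hlen : ms.length = bs.length := by simp [hms, hbs]
  have hmsR : ms.length = R.length := by simp [hms]
  have hple : num_pe ≤ (R.length : Int) := by
    rcases Int.lt_or_le num_pe 0 with h | h
    · omega
    · have : R.length = num_pe.toNat := by
        rw [hR, show num_pe = ((num_pe.toNat : Nat) : Int) by omega, PySem.List.pyRange_zero_natCast]
        simp
        omega
      omega
  have hpre' : ∀ p ∈ adj_dict, -(ms.length : Int) ≤ PySem.Int.floordiv p.1 num_nodes_per_pe ∧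
      PySem.Int.floordiv p.1 num_nodes_per_pe < (ms.length : Int) := by
    intro p hp
    obtain ⟨h1, h2⟩ := hrange p hp
    rw [hmsR]
    omega
  have hinv : ∀ j, j < ms.length → ∃ tl, bs.getD j [] = 0 :: tl ∧ ms.getD j 0 = tl.foldl max 0 := by
    intro j hj
    have hjR : j < R.length := by omega
    refine ⟨[], ?_, ?_⟩
    · simp [hbs, List.getD_eq_getElem?_getD, hjR]
    · simp [hms, List.getD_eq_getElem?_getD, hjR]
  obtain ⟨la, lb, hrest⟩ := pvCouple num_nodes_per_pe adj_dict ms bs hlen hpre' hinv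
  apply List.ext_getElem
  · simp [la, lb, hlen]
  · intro k hk1 hk2
    have hkm : k < ms.length := by rw [← la]; exact hk1
    obtain ⟨tl, hb, ha⟩ := hrest k hkm
    have hkb : k < (adj_dict.foldl (pvStepB num_nodes_per_pe) bs).length := by
      rw [lb, ← hlen]; exact hkm
    rw [← List.getD_eq_getElem _ _ hk1, ha, List.getElem_map,
        ← List.getD_eq_getElem _ _ hkb, hb]
    unfold PySem.List.maxD
    rw [PySem.List.max?_id_cons]
    rfl
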